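-- pv_equiv track=rewrite | github.com/nicholicaron/palletrack | backend/app/cv_processing/ocr/post_processor.py | format_tracking_number
-- ===== SOURCE A (Python) =====
-- def format_tracking_number(text: str, format_type: str = 'grouped') -> str:
--     """Format tracking number for readability.
--
--     Args:
--         text: Tracking number
--         format_type: Formatting style:
--             - 'grouped': Add spaces every 4 characters
--             - 'dashed': Add dashes every 4 characters
--             - 'none': No formatting
--
--     Returns:
--         Formatted tracking number
--
--     Example:
--         >>> number = "1Z999AA10123456784"
--         >>> formatted = OCRPostProcessor.format_tracking_number(number)
--         >>> # Result: "1Z99 9AA1 0123 4567 84"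
--     """
--     if not text:
--         return ""
--
--     # Remove existing formatting
--     clean = text.replace(' ', '').replace('-', '')
--
--     if format_type == 'grouped':
--         # Add space every 4 characters
--         formatted = ' '.join(clean[i:i+4] for i in range(0, len(clean), 4))
--         return formatted
--     elif format_type == 'dashed':
--         # Add dash every 4 characters
--         formatted = '-'.join(clean[i:i+4] for i in range(0, len(clean), 4))
--         return formatted
--     else:
--         return clean
-- ===== SOURCE B (Python) =====
-- def format_tracking_number(text: str, format_type: str = 'grouped') -> str:
--     """Single pass over the cleaned characters with an index counter,
--     inserting the separator after every 4th character when more remain."""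
--     if text == "":
--         return ""
--     clean = [c for c in text if c != ' ' and c != '-']
--     if format_type == 'grouped':
--         sep = ' '
--     elif format_type == 'dashed':
--         sep = '-'
--     else:
--         sep = ''
--     n = len(clean)
--     out = []
--     for i, c in enumerate(clean):
--         out.append(c)
--         if (i + 1) % 4 == 0 and i + 1 < n:
--             out.append(sep)
--     return ''.join(out)
-- ===== Notes on version B (the rewrite author's own statement) =====
-- stated objective: alternative
-- what changed: Replaces the chunk-slicing-plus-join strategy (slices of 4 joined with the separator, one branch per format) with a single character-by-character pass over the cleaned text that appends the chosen separator whenever the running index+1 is divisible by 4 and characters remain.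
import Mathlib
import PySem

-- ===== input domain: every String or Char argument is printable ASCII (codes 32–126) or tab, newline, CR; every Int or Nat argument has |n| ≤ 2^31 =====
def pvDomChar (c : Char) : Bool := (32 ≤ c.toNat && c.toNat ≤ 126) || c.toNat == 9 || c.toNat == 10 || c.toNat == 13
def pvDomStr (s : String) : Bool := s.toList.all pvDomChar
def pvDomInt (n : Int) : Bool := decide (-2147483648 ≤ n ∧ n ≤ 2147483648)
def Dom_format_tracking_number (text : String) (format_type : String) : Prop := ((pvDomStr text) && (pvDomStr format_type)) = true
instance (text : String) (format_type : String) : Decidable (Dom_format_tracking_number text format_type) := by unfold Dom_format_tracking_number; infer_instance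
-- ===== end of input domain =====

-- B replaces the chunk-slice-and-join strategy with a single indexed pass over the
-- cleaned characters, inserting the separator after every 4th character when more remain
-- (objective: alternative decomposition, same cost).


-- ===== PORT A =====
def format_tracking_number (text : String) (format_type : String) : String :=
  if text == "" then ""
  else
    let clean := PySem.Str.replace (PySem.Str.replace text " " "") "-" ""
    if format_type == "grouped" then
      PySem.Str.join " " ((PySem.List.pyRange 0 (PySem.Str.len clean) 4).map
        (fun i => PySem.Str.slice clean (some i) (some (i + 4))))
    else if format_type == "dashed" then
      PySem.Str.join "-" ((PySem.List.pyRange 0 (PySem.Str.len clean) 4).map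
        (fun i => PySem.Str.slice clean (some i) (some (i + 4))))
    else clean

-- ===== PORT B =====
def format_tracking_number_alt (text : String) (format_type : String) : String :=
  if text == "" then ""
  else
    let clean : List Char := text.toList.filter (fun c => c != ' ' && c != '-')
    let sep : String :=
      if format_type == "grouped" then " "
      else if format_type == "dashed" then "-"
      else ""
    let n : Int := clean.length
    let out : List Char := (PySem.List.enumerate clean 0).foldl
      (fun acc ic =>
        let acc2 := acc ++ [ic.2]
        if PySem.Int.mod (ic.1 + 1) 4 == 0 && decide (ic.1 + 1 < n) then acc2 ++ sep.toList
        else acc2)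
      []
    String.ofList out

-- ===== PRECONDITION & SPEC =====
def Spec_format_tracking_number (text : String) (format_type : String) (out : String) : Prop := out = format_tracking_number_alt text format_type
instance (text : String) (format_type : String) (out : String) : Decidable (Spec_format_tracking_number text format_type out) := by unfold Spec_format_tracking_number; infer_instance

-- ===== CLAIM (what is proved, stated in full; the proofs are below) =====
def Claim_equal_format_tracking_number : Prop := ∀ (text : String) (format_type : String), Dom_format_tracking_number text format_type → Spec_format_tracking_number text format_type (format_tracking_number text format_type)

-- ===== LEMMAS AND PROOFS =====

-- str.replace(s, single_char, '') is a filter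
theorem pv_replace_go_single (a : Char) : ∀ (fuel : Nat) (cs acc : List Char), cs.length ≤ fuel →
    PySem.Chars.replace.go [a] [] fuel cs acc = acc.reverse ++ cs.filter (fun c => c != a) := by
  intro fuel
  induction fuel with
  | zero =>
    intro cs acc h
    have : cs = [] := by
      cases cs with
      | nil => rfl
      | cons x t => simp at h
    subst this
    simp [PySem.Chars.replace.go]
  | succ m ih =>
    intro cs acc h
    cases cs with
    | nil => simp [PySem.Chars.replace.go]
    | cons c t =>
      by_cases hc : a = c
      · subst hc
        simp only [PySem.Chars.replace.go, List.isPrefixOf, BEq.rfl, Bool.true_and, if_pos]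
        simp only [List.length_cons, List.length_nil, List.drop_succ_cons, List.drop_zero,
          List.reverse_nil, List.nil_append]
        rw [ih t acc (by simpa using h)]
        simp
      · have hpre : List.isPrefixOf [a] (c :: t) = false := by
          simp [List.isPrefixOf]; exact fun h' => hc h'
        simp only [PySem.Chars.replace.go, hpre, Bool.false_eq_true, if_neg, not_false_iff]
        rw [ih t (c :: acc) (by simpa using h)]
        have hb : (c != a) = true := by simp [bne]; exact fun h' => hc h'.symm
        simp [List.filter_cons, hb]

theorem pv_replace_single (a : Char) (cs : List Char) :
    PySem.Chars.replace cs [a] [] = cs.filter (fun c => c != a) := by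
  rw [PySem.Chars.replace]
  simp only [List.isEmpty_cons, if_neg, Bool.false_eq_true, not_false_iff]
  rw [pv_replace_go_single a cs.length cs [] le_rfl]
  simp

theorem pv_clean_toList (text : String) :
    (PySem.Str.replace (PySem.Str.replace text " " "") "-" "").toList
      = text.toList.filter (fun c => c != ' ' && c != '-') := by
  rw [PySem.Str.toList_replace, PySem.Str.toList_replace]
  have h1 : (" " : String).toList = [' '] := by decide
  have h2 : ("-" : String).toList = ['-'] := by decide
  have h3 : ("" : String).toList = [] := by decide
  rw [h1, h2, h3, pv_replace_single, pv_replace_single, List.filter_filter]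
  apply List.filter_congr
  intro c _
  cases h : (c != ' ') <;> cases h' : (c != '-') <;> simp [h, h']

-- the B-side loop, described positionally
def pvBuild (sep : List Char) (n : Int) : Int → List Char → List Char
  | _, [] => []
  | k, c :: t =>
      c :: ((if PySem.Int.mod (k + 1) 4 == 0 && decide (k + 1 < n) then sep else [])
              ++ pvBuild sep n (k + 1) t)

theorem pv_foldl_eq_build (sep : List Char) (n : Int) :
    ∀ (cs : List Char) (k : Int) (acc : List Char),
      (PySem.List.enumerate cs k).foldl
        (fun acc ic =>
          let acc2 := acc ++ [ic.2]
          if PySem.Int.mod (ic.1 + 1) 4 == 0 && decide (ic.1 + 1 < n) then acc2 ++ sep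
          else acc2)
        acc
      = acc ++ pvBuild sep n k cs := by
  intro cs
  induction cs with
  | nil => intro k acc; simp [pvBuild]
  | cons c t ih =>
    intro k acc
    rw [PySem.List.enumerate_cons, List.foldl_cons, ih]
    by_cases h : (PySem.Int.mod (k + 1) 4 == 0 && decide (k + 1 < n)) = true
    · simp only [h, if_pos, pvBuild]
      simp [List.append_assoc]
    · simp only [h, Bool.false_eq_true, if_neg, not_false_iff, pvBuild]
      simp only [Bool.not_eq_true] at h
      simp [h, List.append_assoc]

theorem pv_build_nil_sep (n : Int) : ∀ (k : Int) (cs : List Char), pvBuild [] n k cs = cs := by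
  intro k cs
  induction cs generalizing k with
  | nil => simp [pvBuild]
  | cons c t ih => simp [pvBuild, ih]

-- arithmetic helper: Python (k+j) % 4 for k a nonnegative multiple of 4
theorem pv_mod_helper (k j : Int) (hk : (4 : Int) ∣ k) (h0 : 0 ≤ k) :
    (PySem.Int.mod (k + j) 4 == 0) = decide ((4 : Int) ∣ j) := by
  have hfm : PySem.Int.mod (k + j) 4 = (k + j) % 4 := by
    simp [PySem.Int.mod, Int.fmod_eq_emod]
  rw [hfm]
  by_cases hd : (4 : Int) ∣ j
  · simp [hd]
    omega
  · simp [hd]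
    omega

theorem pv_build_short (sep : List Char) (k : Int) (cs : List Char)
    (hk : (4 : Int) ∣ k) (h0 : 0 ≤ k) (hlen : cs.length ≤ 4) :
    pvBuild sep (k + cs.length) k cs = cs := by
  have h1 : ¬ ((4:Int) ∣ 1) := by decide
  have h2 : ¬ ((4:Int) ∣ 2) := by decide
  have h3 : ¬ ((4:Int) ∣ 3) := by decide
  match cs, hlen with
  | [], _ => simp [pvBuild]
  | [a], _ =>
    simp only [pvBuild]
    rw [pv_mod_helper k 1 hk h0]
    simp [h1]
  | [a,b], _ =>
    simp only [pvBuild]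
    rw [show k + 1 + 1 = k + 2 by ring]
    rw [pv_mod_helper k 1 hk h0, pv_mod_helper k 2 hk h0]
    simp [h1, h2]
  | [a,b,c], _ =>
    simp only [pvBuild]
    rw [show k + 1 + 1 = k + 2 by ring, show k + 2 + 1 = k + 3 by ring]
    rw [pv_mod_helper k 1 hk h0, pv_mod_helper k 2 hk h0, pv_mod_helper k 3 hk h0]
    simp [h1, h2, h3]
  | [a,b,c,d], _ =>
    simp only [pvBuild]
    rw [show k + 1 + 1 = k + 2 by ring, show k + 2 + 1 = k + 3 by ring,
        show k + 3 + 1 = k + 4 by ring]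
    rw [pv_mod_helper k 1 hk h0, pv_mod_helper k 2 hk h0, pv_mod_helper k 3 hk h0,
        pv_mod_helper k 4 hk h0]
    have h4 : ¬ (k + 4 < k + (([a,b,c,d] : List Char).length : Int)) := by
      simp only [List.length_cons, List.length_nil]
      omega
    simp [h1, h2, h3, h4]

theorem pv_build_step (sep : List Char) (k : Int) (cs : List Char)
    (hk : (4 : Int) ∣ k) (h0 : 0 ≤ k) (hlen : 4 < cs.length) :
    pvBuild sep (k + cs.length) k cs
      = cs.take 4 ++ sep ++ pvBuild sep (k + cs.length) (k + 4) (cs.drop 4) := by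
  have h1 : ¬ ((4:Int) ∣ 1) := by decide
  have h2 : ¬ ((4:Int) ∣ 2) := by decide
  have h3 : ¬ ((4:Int) ∣ 3) := by decide
  have h4 : (4:Int) ∣ 4 := by decide
  match cs, hlen with
  | a :: b :: c :: d :: t, hlen =>
    simp only [pvBuild]
    rw [show k + 1 + 1 = k + 2 by ring, show k + 2 + 1 = k + 3 by ring,
        show k + 3 + 1 = k + 4 by ring]
    rw [pv_mod_helper k 1 hk h0, pv_mod_helper k 2 hk h0, pv_mod_helper k 3 hk h0,
        pv_mod_helper k 4 hk h0]
    have hlt : k + 4 < k + ((a :: b :: c :: d :: t).length : Int) := by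
      simp only [List.length_cons]
      have : 4 < (a :: b :: c :: d :: t).length := hlen
      simp only [List.length_cons] at this
      push_cast
      omega
    simp only [List.take_succ_cons, List.take_zero, List.drop_succ_cons, List.drop_zero]
    simp [h1, h2, h3, h4, hlt]
    intro hcontra
    exfalso
    simp only [List.length_cons] at hlen
    omega

-- A-side chunks in a normal form
def pvChunks (cs : List Char) : List (List Char) :=
  (List.range ((cs.length + 3) / 4)).map (fun j => (cs.drop (4 * j)).take 4)

theorem pv_chunks_eq (cs : List Char) :
    (PySem.List.pyRange 0 (cs.length : Int) 4).map
        (fun i => PySem.Chars.slice cs (some i) (some (i + 4)))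
      = pvChunks cs := by
  rw [PySem.List.pyRange_of_pos 0 (cs.length : Int) (by norm_num)]
  rw [List.map_map, pvChunks]
  have hm : (if (0:Int) < (cs.length : Int) then (((cs.length : Int) - 0 + 4 - 1) / 4).toNat else 0)
      = (cs.length + 3) / 4 := by
    by_cases h : 0 < cs.length
    · rw [if_pos (by exact_mod_cast h)]
      omega
    · rw [if_neg (by exact_mod_cast h)]
      omega
  rw [hm]
  apply List.map_congr_left
  intro j _
  show PySem.Chars.slice cs (some (0 + 4 * (j:Int))) (some (0 + 4 * (j:Int) + 4)) = _
  have e1 : (0 : Int) + 4 * (j:Int) = ((4 * j : Nat) : Int) := by push_cast; ring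
  have e2 : (0 : Int) + 4 * (j:Int) + 4 = ((4 * j : Nat) : Int) + ((4 : Nat) : Int) := by
    push_cast; ring
  rw [e2, e1]
  exact_mod_cast PySem.List.slice_natCast_add cs (4 * j) 4

theorem pv_chunks_nil : pvChunks [] = [] := by
  simp [pvChunks]

theorem pv_chunks_step (cs : List Char) (h : cs ≠ []) :
    pvChunks cs = cs.take 4 :: pvChunks (cs.drop 4) := by
  have hlen : 1 ≤ cs.length := by
    cases cs with
    | nil => exact absurd rfl h
    | cons a t => simp
  have hm : (cs.length + 3) / 4 = ((cs.drop 4).length + 3) / 4 + 1 := by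
    simp only [List.length_drop]
    omega
  rw [pvChunks, hm, List.range_succ_eq_map, List.map_cons, List.map_map]
  simp only [Nat.mul_zero, List.drop_zero]
  congr 1
  rw [pvChunks]
  apply List.map_congr_left
  intro j _
  show ((cs.drop (4 * (j + 1))).take 4) = (((cs.drop 4).drop (4 * j)).take 4)
  rw [List.drop_drop]
  congr 2
  omega

theorem pv_join_chunks_eq_build (sep : List Char) :
    ∀ (m : Nat) (cs : List Char) (k : Int), cs.length = m → (4 : Int) ∣ k → 0 ≤ k →
      PySem.Chars.join sep (pvChunks cs) = pvBuild sep (k + cs.length) k cs := by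
  intro m
  induction m using Nat.strong_induction_on with
  | _ m ih =>
    intro cs k hm hk h0
    by_cases hnil : cs = []
    · subst hnil
      simp [pv_chunks_nil, PySem.Chars.join_nil, pvBuild]
    · by_cases hle : cs.length ≤ 4
      · have hdrop : cs.drop 4 = [] := List.drop_eq_nil_of_le hle
        rw [pv_chunks_step cs hnil, hdrop, pv_chunks_nil,
          List.take_of_length_le hle, PySem.Chars.join_singleton,
          pv_build_short sep k cs hk h0 hle]
      · have hle : 4 < cs.length := by omega
        have hdropne : cs.drop 4 ≠ [] := by
          intro h
          have := congrArg List.length h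
          simp at this
          omega
        rw [pv_chunks_step cs hnil, pv_chunks_step _ hdropne]
        rw [PySem.Chars.join_cons_cons, ← pv_chunks_step _ hdropne]
        have ihh := ih (cs.drop 4).length (by simp; omega) (cs.drop 4) (k + 4) rfl
          (by exact dvd_add hk (by decide)) (by omega)
        rw [ihh]
        rw [pv_build_step sep k cs hk h0 hle]
        have : k + 4 + ((cs.drop 4).length : Int) = k + (cs.length : Int) := by
          simp only [List.length_drop]
          omega
        rw [this]

theorem pv_string_eq_of_toList {s t : String} (h : s.toList = t.toList) : s = t := by
  have := congrArg String.ofList h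
  simpa using this

theorem pv_main (text : String) (sepS : String) :
    (PySem.Str.join sepS
        ((PySem.List.pyRange 0 (PySem.Str.len (PySem.Str.replace (PySem.Str.replace text " " "") "-" "")) 4).map
          (fun i => PySem.Str.slice (PySem.Str.replace (PySem.Str.replace text " " "") "-" "") (some i) (some (i + 4))))).toList
      = (PySem.List.enumerate (text.toList.filter (fun c => c != ' ' && c != '-')) 0).foldl
          (fun acc ic =>
            let acc2 := acc ++ [ic.2]
            if PySem.Int.mod (ic.1 + 1) 4 == 0 &&
                decide (ic.1 + 1 < ((text.toList.filter (fun c => c != ' ' && c != '-')).length : Int)) then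
              acc2 ++ sepS.toList
            else acc2)
          [] := by
  set cleanB := text.toList.filter (fun c => c != ' ' && c != '-') with hB
  have hClean : (PySem.Str.replace (PySem.Str.replace text " " "") "-" "").toList = cleanB :=
    pv_clean_toList text
  have hLen : PySem.Str.len (PySem.Str.replace (PySem.Str.replace text " " "") "-" "")
      = (cleanB.length : Int) := by
    rw [PySem.Str.len_eq, hClean]
  rw [PySem.Str.toList_join, List.map_map, hLen]
  have hmap : (String.toList ∘ fun i =>
        PySem.Str.slice (PySem.Str.replace (PySem.Str.replace text " " "") "-" "") (some i) (some (i + 4)))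
      = fun i => PySem.Chars.slice cleanB (some i) (some (i + 4)) := by
    funext i
    show (PySem.Str.slice _ _ _).toList = _
    rw [PySem.Str.toList_slice, hClean]
  rw [hmap, pv_chunks_eq cleanB]
  rw [pv_join_chunks_eq_build sepS.toList cleanB.length cleanB 0 rfl ⟨0, rfl⟩ le_rfl]
  rw [pv_foldl_eq_build sepS.toList (cleanB.length : Int) cleanB 0 []]
  rw [List.nil_append, zero_add]

-- ===== VERDICT (by name: the statement is the Claim_ definition above) =====
theorem format_tracking_number_spec : Claim_equal_format_tracking_number := by
  intro text format_type _
  unfold Spec_format_tracking_number format_tracking_number format_tracking_number_alt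
  by_cases hempty : text == ""
  · simp [hempty]
  · simp only [hempty, Bool.false_eq_true, if_neg, not_false_iff]
    by_cases hg : format_type == "grouped"
    · simp only [hg, if_pos]
      apply pv_string_eq_of_toList
      rw [String.toList_ofList]
      exact pv_main text " "
    · simp only [hg, Bool.false_eq_true, if_neg, not_false_iff]
      by_cases hd : format_type == "dashed"
      · simp only [hd, if_pos]
        apply pv_string_eq_of_toList
        rw [String.toList_ofList]
        exact pv_main text "-"
      · simp only [hd, Bool.false_eq_true, if_neg, not_false_iff]
        apply pv_string_eq_of_toList
        rw [String.toList_ofList]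
        rw [pv_foldl_eq_build (("":String).toList)
          ((text.toList.filter (fun c => c != ' ' && c != '-')).length : Int)
          (text.toList.filter (fun c => c != ' ' && c != '-')) 0 []]
        rw [List.nil_append]
        rw [show ("":String).toList = [] from by decide, pv_build_nil_sep]
        exact pv_clean_toList text
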